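-- pv_equiv track=rewrite | github.com/vudirvp-sketch/titan-protocol | src/context/version_vectors.py | _vector_dominates
-- ===== SOURCE A (Python) =====
-- from typing import Dict, List, Optional, Any, Set, Tuple
--
-- def _vector_dominates(
--
--     v1: Dict[str, int],
--     v2: Dict[str, int]
-- ) -> bool:
--     """Check if v1 dominates v2."""
--     dominates = False
--     all_keys = set(v1.keys()) | set(v2.keys())
--
--     for key in all_keys:
--         v1_val = v1.get(key, 0)
--         v2_val = v2.get(key, 0)
--
--         if v1_val < v2_val:
--             return False
--         if v1_val > v2_val:
--             dominates = True
--
--     return dominates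
-- ===== SOURCE B (Python) =====
-- def _vector_dominates(v1, v2):
--     """Check if v1 dominates v2: v1 is the least upper bound of {v1, v2} and they differ."""
--     keys = set(v1.keys()) | set(v2.keys())
--     m1 = {k: v1.get(k, 0) for k in keys}
--     m2 = {k: v2.get(k, 0) for k in keys}
--     join = {k: max(m1[k], m2[k]) for k in keys}
--     return join == m1 and m1 != m2
-- ===== Notes on version B (the rewrite author's own statement) =====
-- stated objective: alternative
-- what changed: Lattice formulation: materialises the totalised vectors and their pointwise join (max) over the key union as dicts and decides domination by two dict comparisons (join == v1 and v1 != v2), instead of A's fused early-return scan with a strict-excess flag.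
import Mathlib
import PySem

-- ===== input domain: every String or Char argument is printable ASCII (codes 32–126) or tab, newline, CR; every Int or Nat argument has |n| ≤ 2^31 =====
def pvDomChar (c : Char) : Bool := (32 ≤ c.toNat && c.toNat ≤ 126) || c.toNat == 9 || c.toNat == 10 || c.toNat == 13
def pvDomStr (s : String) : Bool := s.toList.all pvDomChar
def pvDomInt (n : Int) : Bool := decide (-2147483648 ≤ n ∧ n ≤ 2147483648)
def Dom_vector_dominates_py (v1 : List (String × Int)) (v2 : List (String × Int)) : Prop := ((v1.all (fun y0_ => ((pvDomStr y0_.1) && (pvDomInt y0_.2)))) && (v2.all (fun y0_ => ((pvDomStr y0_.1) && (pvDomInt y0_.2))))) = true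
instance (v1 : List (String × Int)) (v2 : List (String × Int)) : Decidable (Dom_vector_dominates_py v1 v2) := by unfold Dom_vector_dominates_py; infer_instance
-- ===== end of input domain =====

-- B replaces A's fused early-return scan (with a strict-excess flag) by a lattice
-- formulation: totalise both vectors over the key union, build their pointwise join
-- (max), and decide domination by two dict comparisons (join == v1 and v1 != v2).

-- ===== PORT A =====
-- the 'for key in all_keys' loop: early return False on v1_val < v2_val, else carry the flag
def vdLoopA (d1 d2 : PySem.Dict String Int) : List String → Bool → Bool
  | [], dominates => dominates
  | k :: ks, dominates =>
    let v1v := d1.getD k 0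
    let v2v := d2.getD k 0
    if v1v < v2v then false
    else vdLoopA d1 d2 ks (if v1v > v2v then true else dominates)

def vector_dominates_py (v1 : List (String × Int)) (v2 : List (String × Int)) : Bool :=
  let d1 := PySem.Dict.ofList v1
  let d2 := PySem.Dict.ofList v2
  let allKeys := PySem.Set.union (PySem.Set.ofList d1.keys) d2.keys
  vdLoopA d1 d2 allKeys false

-- ===== PORT B =====
-- The three dict comprehensions iterate the same duplicate-free key list, so Python's
-- (order-insensitive) dict equality on them coincides with association-list equality,
-- which is how 'join == m1' and 'm1 != m2' are ported here (exact on these dicts).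
def vector_dominates_py_alt (v1 : List (String × Int)) (v2 : List (String × Int)) : Bool :=
  let d1 := PySem.Dict.ofList v1
  let d2 := PySem.Dict.ofList v2
  let keys := PySem.Set.union (PySem.Set.ofList d1.keys) d2.keys
  let m1 := keys.map (fun k => (k, d1.getD k 0))
  let m2 := keys.map (fun k => (k, d2.getD k 0))
  let join := keys.map (fun k => (k, max (d1.getD k 0) (d2.getD k 0)))
  (join == m1) && !(m1 == m2)

-- ===== PRECONDITION & SPEC =====
def Spec_vector_dominates_py (v1 : List (String × Int)) (v2 : List (String × Int)) (out : Bool) : Prop := out = vector_dominates_py_alt v1 v2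
instance (v1 : List (String × Int)) (v2 : List (String × Int)) (out : Bool) : Decidable (Spec_vector_dominates_py v1 v2 out) := by unfold Spec_vector_dominates_py; infer_instance

-- ===== CLAIM (what is proved, stated in full; the proofs are below) =====
def Claim_equal_vector_dominates_py : Prop := ∀ (v1 : List (String × Int)) (v2 : List (String × Int)), Dom_vector_dominates_py v1 v2 → Spec_vector_dominates_py v1 v2 (vector_dominates_py v1 v2)

-- ===== LEMMAS AND PROOFS =====

-- A's fused loop equals "all components ≥, and flag-or-some-component-differs"
theorem vdLoopA_eq (d1 d2 : PySem.Dict String Int) :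
    ∀ (ks : List String) (dom : Bool),
      vdLoopA d1 d2 ks dom =
        (ks.all (fun k => d1.getD k 0 ≥ d2.getD k 0) &&
          (dom || ks.any (fun k => d1.getD k 0 ≠ d2.getD k 0))) := by
  intro ks
  induction ks with
  | nil => intro dom; simp [vdLoopA]
  | cons k ks ih =>
    intro dom
    simp only [vdLoopA, List.all_cons, List.any_cons]
    by_cases hlt : d1.getD k 0 < d2.getD k 0
    · simp [hlt, show ¬ (d1.getD k 0 ≥ d2.getD k 0) by omega]
    · have hge : d1.getD k 0 ≥ d2.getD k 0 := by omega
      rw [if_neg hlt, ih]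
      by_cases hgt : d1.getD k 0 > d2.getD k 0
      · have hne : d1.getD k 0 ≠ d2.getD k 0 := by omega
        simp [hgt, hge, hne]
      · have heq : d1.getD k 0 = d2.getD k 0 := by omega
        simp [heq]

-- join == m1 over the same key list is componentwise ≥
theorem join_eq_iff_all_ge (f g : String → Int) (ks : List String) :
    ((ks.map (fun k => (k, max (f k) (g k))) == ks.map (fun k => (k, f k))) : Bool) =
      ks.all (fun k => f k ≥ g k) := by
  rw [Bool.eq_iff_iff]
  simp only [beq_iff_eq, List.map_inj_left, Prod.mk.injEq, true_and, List.all_eq_true,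
    decide_eq_true_eq, ge_iff_le, max_eq_left_iff]

-- m1 ≠ m2 over the same key list is componentwise difference somewhere
theorem maps_ne_iff_any_ne (f g : String → Int) (ks : List String) :
    (!(ks.map (fun k => (k, f k)) == ks.map (fun k => (k, g k))) : Bool) =
      ks.any (fun k => f k ≠ g k) := by
  rw [Bool.eq_iff_iff]
  simp only [Bool.not_eq_eq_eq_not, Bool.not_true, beq_eq_false_iff_ne, ne_eq,
    List.map_inj_left, Prod.mk.injEq, true_and, List.any_eq_true, decide_eq_true_eq,
    not_forall]
  constructor
  · rintro ⟨k, hk, hne⟩; exact ⟨k, hk, hne⟩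
  · rintro ⟨k, hk, hne⟩; exact ⟨k, hk, hne⟩

-- ===== VERDICT (by name: the statement is the Claim_ definition above) =====
theorem vector_dominates_py_spec : Claim_equal_vector_dominates_py := by
  intro v1 v2 _
  unfold Spec_vector_dominates_py vector_dominates_py vector_dominates_py_alt
  simp only [vdLoopA_eq, join_eq_iff_all_ge, maps_ne_iff_any_ne]
  simp
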